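-- pv_equiv track=rewrite | github.com/leyz03/lime-opr | config_generate.py | _generate_l_init
-- ===== SOURCE A (Python) =====
-- from typing import Dict, Tuple, List, Optional, Any
--
-- def _generate_l_init(Workers: List[int], Nodes: List[int], W_init: Dict[int, int]) -> Dict[Tuple[int, int], int]:
--     """
--     Initializes individual worker locations consistent with aggregate W_init.
--     Produces l_init[(w,i)] in {0,1}.
--     """
--     # assign worker IDs to nodes according to W_init counts
--     assignment: List[int] = []
--     for i in Nodes:
--         assignment.extend([i] * int(W_init[i]))
--     if len(assignment) != len(Workers):
--         raise RuntimeError("Worker initialization mismatch (W_init does not match n_workers).")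
--
--     l_init: Dict[Tuple[int, int], int] = {}
--     for w, i0 in zip(Workers, assignment):
--         for i in Nodes:
--             l_init[(w, i)] = 1 if i == i0 else 0
--     return l_init
-- ===== SOURCE B (Python) =====
-- from typing import Dict, Tuple, List
--
-- def _generate_l_init(Workers: List[int], Nodes: List[int], W_init: Dict[int, int]) -> Dict[Tuple[int, int], int]:
--     """
--     Initializes individual worker locations consistent with aggregate W_init.
--     Produces l_init[(w,i)] in {0,1}.
--     Single fused pass: no intermediate assignment list; a running index into
--     Workers walks the per-node blocks directly.
--     """
--     n = len(Workers)
--     idx = 0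
--     l_init: Dict[Tuple[int, int], int] = {}
--     for i0 in Nodes:
--         for _ in range(int(W_init[i0])):
--             if idx == n:
--                 raise RuntimeError("Worker initialization mismatch (W_init does not match n_workers).")
--             w = Workers[idx]
--             idx += 1
--             for i in Nodes:
--                 l_init[(w, i)] = int(i == i0)
--     if idx != n:
--         raise RuntimeError("Worker initialization mismatch (W_init does not match n_workers).")
--     return l_init
-- ===== Notes on version B (the rewrite author's own statement) =====
-- stated objective: simpler
-- what changed: Drops the intermediate count-expanded assignment list and the zip pass: a single fused traversal over Nodes keeps a running index into Workers and emits each worker's one-hot row directly inside the per-node count block.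
import Mathlib
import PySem

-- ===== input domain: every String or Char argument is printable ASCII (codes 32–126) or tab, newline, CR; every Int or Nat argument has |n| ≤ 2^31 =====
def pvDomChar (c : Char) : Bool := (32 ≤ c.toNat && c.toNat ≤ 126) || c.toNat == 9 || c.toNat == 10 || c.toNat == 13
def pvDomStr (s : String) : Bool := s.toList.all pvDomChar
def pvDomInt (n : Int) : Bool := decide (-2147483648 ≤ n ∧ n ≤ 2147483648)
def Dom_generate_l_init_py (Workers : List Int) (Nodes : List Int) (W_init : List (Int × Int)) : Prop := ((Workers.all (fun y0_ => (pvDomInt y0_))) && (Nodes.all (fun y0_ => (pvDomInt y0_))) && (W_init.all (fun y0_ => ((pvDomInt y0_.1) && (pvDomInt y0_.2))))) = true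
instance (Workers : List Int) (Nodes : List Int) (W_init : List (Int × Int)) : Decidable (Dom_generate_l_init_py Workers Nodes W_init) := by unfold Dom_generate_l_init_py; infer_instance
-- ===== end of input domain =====

-- B fuses A's two passes (count-expansion into an assignment list, then zip-and-emit)
-- into one traversal over Nodes with a running index into Workers; equivalence is on
-- the returned dict (neither version mutates its arguments).

-- ===== PORT A =====
def generate_l_init_py (Workers : List Int) (Nodes : List Int) (W_init : List (Int × Int)) : List (Int × Int × Int) :=
  -- assignment.extend([i] * int(W_init[i]))  (missing key would be a KeyError: outside Pre_)
  let assignment : List Int :=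
    Nodes.foldl (fun acc i => acc ++ List.replicate ((PySem.Dict.mk W_init).getD i 0).toNat i) []
  if assignment.length ≠ Workers.length then []   -- raise RuntimeError: outside Pre_
  else
    let l_init : PySem.Dict (Int × Int) Int :=
      (Workers.zip assignment).foldl (fun d wi =>
        Nodes.foldl (fun d i => d.insert (wi.1, i) (if i = wi.2 then 1 else 0)) d)
        PySem.Dict.empty
    l_init.items.map (fun kv => (kv.1.1, kv.1.2, kv.2))

-- ===== PORT B =====
-- the inner row write: for i in Nodes: l_init[(w, i)] = int(i == i0)
def pvAltRow (Nodes : List Int) (w i0 : Int) (d : PySem.Dict (Int × Int) Int) : PySem.Dict (Int × Int) Int :=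
  Nodes.foldl (fun d i => d.insert (w, i) (if i = i0 then 1 else 0)) d

def generate_l_init_py_alt (Workers : List Int) (Nodes : List Int) (W_init : List (Int × Int)) : List (Int × Int × Int) :=
  let n := Workers.length
  let st :=
    Nodes.foldl (fun (st : Nat × PySem.Dict (Int × Int) Int) i0 =>
      (PySem.List.pyRange 0 ((PySem.Dict.mk W_init).getD i0 0) 1).foldl (fun st _ =>
        match PySem.List.pyGet? Workers (st.1 : Int) with
        | none => st            -- idx == n: Python raises RuntimeError here; outside Pre_
        | some w => (st.1 + 1, pvAltRow Nodes w i0 st.2)) st)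
      ((0 : Nat), PySem.Dict.empty)
  if st.1 ≠ n then []           -- raise RuntimeError: outside Pre_
  else st.2.items.map (fun kv => (kv.1.1, kv.1.2, kv.2))

-- ===== PRECONDITION & SPEC =====
-- Pre_ excludes exactly the inputs where A raises: a node missing from W_init (KeyError),
-- or counts whose (nonneg-clamped) total differs from len(Workers) (RuntimeError).
def Pre_generate_l_init_py (Workers : List Int) (Nodes : List Int) (W_init : List (Int × Int)) : Prop :=
  (∀ i ∈ Nodes, (PySem.Dict.mk W_init).contains i = true) ∧
  (Nodes.map (fun i => ((PySem.Dict.mk W_init).getD i 0).toNat)).sum = Workers.length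
instance (Workers : List Int) (Nodes : List Int) (W_init : List (Int × Int)) : Decidable (Pre_generate_l_init_py Workers Nodes W_init) := by unfold Pre_generate_l_init_py; infer_instance

def pvWitness_generate_l_init_py : List Int × List Int × (List (Int × Int)) :=
  ([10, 20, 30], [1, 2], [(1, 1), (2, 2)])

def Spec_generate_l_init_py (Workers : List Int) (Nodes : List Int) (W_init : List (Int × Int)) (out : List (Int × Int × Int)) : Prop := out = generate_l_init_py_alt Workers Nodes W_init
instance (Workers : List Int) (Nodes : List Int) (W_init : List (Int × Int)) (out : List (Int × Int × Int)) : Decidable (Spec_generate_l_init_py Workers Nodes W_init out) := by unfold Spec_generate_l_init_py; infer_instance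

-- ===== CLAIM (what is proved, stated in full; the proofs are below) =====
def Claim_equal_generate_l_init_py : Prop := ∀ (Workers : List Int) (Nodes : List Int) (W_init : List (Int × Int)), Dom_generate_l_init_py Workers Nodes W_init → Pre_generate_l_init_py Workers Nodes W_init → Spec_generate_l_init_py Workers Nodes W_init (generate_l_init_py Workers Nodes W_init)

-- ===== LEMMAS AND PROOFS =====

theorem generate_l_init_witness_ok :
    Dom_generate_l_init_py pvWitness_generate_l_init_py.1 pvWitness_generate_l_init_py.2.1 pvWitness_generate_l_init_py.2.2 ∧
    Pre_generate_l_init_py pvWitness_generate_l_init_py.1 pvWitness_generate_l_init_py.2.1 pvWitness_generate_l_init_py.2.2 := by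
  decide

-- A's assignment accumulator is the flatMap of replicated nodes
theorem pv_assignment_eq (Nodes : List Int) (f : Int → Nat) (acc : List Int) :
    Nodes.foldl (fun acc i => acc ++ List.replicate (f i) i) acc
      = acc ++ Nodes.flatMap (fun i => List.replicate (f i) i) := by
  induction Nodes generalizing acc with
  | nil => simp
  | cons i ns ih => simp [List.foldl_cons, ih, List.append_assoc]

-- B's inner count loop: with room in Workers, it advances idx by m and applies
-- one row per worker of the next block
theorem pv_block_eq (Workers Nodes : List Int) (i0 : Int) (m k : Nat)
    (d : PySem.Dict (Int × Int) Int) (h : k + m ≤ Workers.length) :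
    (List.range m).foldl (fun st _ =>
        match PySem.List.pyGet? Workers (st.1 : Int) with
        | none => st
        | some w => (st.1 + 1, pvAltRow Nodes w i0 st.2)) ((k, d) : Nat × PySem.Dict (Int × Int) Int)
      = (k + m, ((Workers.drop k).take m).foldl (fun d w => pvAltRow Nodes w i0 d) d) := by
  induction m with
  | zero => simp
  | succ m ih =>
      rw [List.range_succ, List.foldl_append, ih (by omega)]
      have hk : k + m < Workers.length := by omega
      have hget : PySem.List.pyGet? Workers ((k + m : Nat) : Int) = some Workers[k + m] := by
        rw [PySem.List.pyGet?_natCast]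
        simp [List.getElem?_eq_getElem hk]
      simp only [List.foldl_cons, List.foldl_nil, hget]
      have htake : (Workers.drop k).take (m + 1)
          = (Workers.drop k).take m ++ [Workers[k + m]] := by
        rw [List.take_add_one]
        have : (Workers.drop k)[m]? = some Workers[k + m] := by
          rw [List.getElem?_drop]
          simp [List.getElem?_eq_getElem hk]
        simp [this]
      rw [htake, List.foldl_append]
      simp [Nat.add_assoc]

-- A's fold over a zip with a constant-replicate right side is B's row fold
theorem pv_zip_replicate_eq (Nodes : List Int) (i0 : Int) (ws : List Int)
    (d : PySem.Dict (Int × Int) Int) :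
    (ws.zip (List.replicate ws.length i0)).foldl (fun d wi =>
        Nodes.foldl (fun d i => d.insert (wi.1, i) (if i = wi.2 then 1 else 0)) d) d
      = ws.foldl (fun d w => pvAltRow Nodes w i0 d) d := by
  induction ws generalizing d with
  | nil => simp
  | cons w ws ih =>
      simp only [List.length_cons, List.replicate_succ, List.zip_cons_cons, List.foldl_cons]
      exact ih _

-- main invariant: B's outer fold from index k equals A's zip fold over the rest
theorem pv_main (Workers AllNodes : List Int) (f : Int → Nat) :
    ∀ (ns : List Int) (k : Nat) (d : PySem.Dict (Int × Int) Int),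
      k + (ns.map f).sum ≤ Workers.length →
      ns.foldl (fun (st : Nat × PySem.Dict (Int × Int) Int) i0 =>
          (List.range (f i0)).foldl (fun st _ =>
            match PySem.List.pyGet? Workers (st.1 : Int) with
            | none => st
            | some w => (st.1 + 1, pvAltRow AllNodes w i0 st.2)) st) ((k, d))
        = (k + (ns.map f).sum,
           ((Workers.drop k).zip (ns.flatMap (fun i => List.replicate (f i) i))).foldl
             (fun d wi => AllNodes.foldl (fun d i => d.insert (wi.1, i) (if i = wi.2 then 1 else 0)) d) d) := by
  intro ns
  induction ns with
  | nil => intro k d _; simp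
  | cons i0 ns ih =>
      intro k d h
      have hsum : ((i0 :: ns).map f).sum = f i0 + (ns.map f).sum := by simp
      have hk : k + f i0 ≤ Workers.length := by omega
      simp only [List.foldl_cons]
      rw [pv_block_eq Workers AllNodes i0 (f i0) k d hk,
          ih (k + f i0) _ (by omega)]
      have hlen : ((Workers.drop k).take (f i0)).length = f i0 := by
        rw [List.length_take, List.length_drop]; omega
      have hsplit : Workers.drop k = (Workers.drop k).take (f i0) ++ Workers.drop (k + f i0) := by
        rw [← List.drop_drop]
        exact (List.take_append_drop _ _).symm
      rw [List.flatMap_cons]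
      conv_rhs => rw [hsplit]
      rw [List.zip_append (by simp [hlen]), List.foldl_append]
      have hz := pv_zip_replicate_eq AllNodes i0 ((Workers.drop k).take (f i0)) d
      rw [hlen] at hz
      rw [hz]
      simp only [Prod.mk.injEq, List.map_cons, List.sum_cons]
      exact ⟨by omega, trivial⟩

theorem pv_expand_length (ns : List Int) (f : Int → Nat) :
    (ns.flatMap (fun i => List.replicate (f i) i)).length = (ns.map f).sum := by
  induction ns with
  | nil => rfl
  | cons i ns ih => simp [ih]

-- ===== VERDICT (by name: the statement is the Claim_ definition above) =====
theorem generate_l_init_py_spec : Claim_equal_generate_l_init_py := by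
  intro Workers Nodes W_init _ hpre
  obtain ⟨_, hsum⟩ := hpre
  unfold Spec_generate_l_init_py generate_l_init_py generate_l_init_py_alt
  simp only [pv_assignment_eq, List.nil_append]
  have hlen : (Nodes.flatMap (fun i => List.replicate ((PySem.Dict.mk W_init).getD i 0).toNat i)).length = Workers.length := by
    rw [pv_expand_length]; exact hsum
  have hrange : ∀ (i0 : Int) (st : Nat × PySem.Dict (Int × Int) Int),
      (PySem.List.pyRange 0 ((PySem.Dict.mk W_init).getD i0 0) 1).foldl (fun st _ =>
          match PySem.List.pyGet? Workers (st.1 : Int) with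
          | none => st
          | some w => (st.1 + 1, pvAltRow Nodes w i0 st.2)) st
        = (List.range ((PySem.Dict.mk W_init).getD i0 0).toNat).foldl (fun st _ =>
          match PySem.List.pyGet? Workers (st.1 : Int) with
          | none => st
          | some w => (st.1 + 1, pvAltRow Nodes w i0 st.2)) st := by
    intro i0 st
    rw [PySem.List.pyRange_one, List.foldl_map]
    simp
  simp only [hrange]
  have hmain := pv_main Workers Nodes (fun i => ((PySem.Dict.mk W_init).getD i 0).toNat)
      Nodes 0 PySem.Dict.empty (by simp [hsum])
  simp only [List.drop_zero] at hmain
  rw [hmain]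
  simp [hlen, hsum]
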